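-- pv_equiv track=rewrite | github.com/FUKUSHUN/shun201805 | COW_PROJECT/behavior_classification/postprocessing.py | make_new_list
-- ===== SOURCE A (Python) =====
-- def make_new_list(old_t_list, new_t_list, something):
--     index = 0
--     new_something = []
--     start = new_t_list[0]
--     end = new_t_list[len(new_t_list) - 1]
--     for time in old_t_list:
--         if (start <= time and time <= end):
--             new_something.append(something[index])
--             index += 1
--     return new_something
-- ===== SOURCE B (Python) =====
-- def make_new_list(old_t_list, new_t_list, something):
--     start = new_t_list[0]
--     end = new_t_list[-1]
--     count = sum(1 for t in old_t_list if start <= t <= end)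
--     return something[:count]
-- ===== Notes on version B (the rewrite author's own statement) =====
-- stated objective: simpler
-- what changed: B replaces A's index-tracking append loop with counting the times in [start, end] and returning the prefix slice something[:count].
import Mathlib
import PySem

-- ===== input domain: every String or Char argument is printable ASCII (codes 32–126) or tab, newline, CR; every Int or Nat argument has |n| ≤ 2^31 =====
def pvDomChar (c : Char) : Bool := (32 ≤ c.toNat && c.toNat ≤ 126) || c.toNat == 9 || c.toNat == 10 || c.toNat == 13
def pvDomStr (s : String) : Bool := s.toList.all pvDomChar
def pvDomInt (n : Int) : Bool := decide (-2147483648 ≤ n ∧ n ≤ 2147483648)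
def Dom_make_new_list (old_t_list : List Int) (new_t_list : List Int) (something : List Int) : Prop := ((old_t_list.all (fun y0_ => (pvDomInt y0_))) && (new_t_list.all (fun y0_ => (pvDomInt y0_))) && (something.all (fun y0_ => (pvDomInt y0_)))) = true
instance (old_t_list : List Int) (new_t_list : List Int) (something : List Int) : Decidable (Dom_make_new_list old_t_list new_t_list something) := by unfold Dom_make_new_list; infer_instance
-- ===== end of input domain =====

-- B replaces A's index-tracking append loop with counting the times in [start, end]
-- and returning the prefix slice something[:count] (objective: simpler).

-- ===== PORT A =====
-- the 'for time in old_t_list' loop with its state (index, new_something);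
-- something[index] is pyGet? (none = IndexError, excluded by Pre_; .getD 0 unreachable there)
def makeNewLoopA (old : List Int) (s e : Int) (something : List Int)
    (index : Nat) (acc : List Int) : List Int :=
  match old with
  | [] => acc
  | t :: ts =>
    if s ≤ t ∧ t ≤ e then
      makeNewLoopA ts s e something (index + 1)
        (acc ++ [(PySem.List.pyGet? something (index : Int)).getD 0])
    else
      makeNewLoopA ts s e something index acc

def make_new_list (old_t_list : List Int) (new_t_list : List Int) (something : List Int) : List Int :=
  -- start = new_t_list[0]; end = new_t_list[len(new_t_list) - 1] (IndexError on [] is excluded by Pre_)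
  match PySem.List.pyGet? new_t_list 0,
        PySem.List.pyGet? new_t_list ((new_t_list.length : Int) - 1) with
  | some s, some e => makeNewLoopA old_t_list s e something 0 []
  | _, _ => []

-- ===== PORT B =====
def make_new_list_alt (old_t_list : List Int) (new_t_list : List Int) (something : List Int) : List Int :=
  match PySem.List.pyGet? new_t_list 0 with
  | none => []
  | some s =>
    match PySem.List.pyGet? new_t_list (-1) with
    | none => []
    | some e =>
      -- count = sum(1 for t in old_t_list if start <= t <= end); something[:count] = take (count ≥ 0)
      something.take (old_t_list.countP (fun t => decide (s ≤ t) && decide (t ≤ e)))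

-- ===== PRECONDITION & SPEC =====
-- Pre_ excludes exactly the inputs on which A raises IndexError: an empty new_t_list,
-- and inputs where more times fall in [start, end] than something has elements.
def Pre_make_new_list (old_t_list : List Int) (new_t_list : List Int) (something : List Int) : Prop :=
  new_t_list ≠ [] ∧
  old_t_list.countP (fun t =>
      decide (new_t_list.headD 0 ≤ t) && decide (t ≤ new_t_list.getLastD 0))
    ≤ something.length
instance (old_t_list : List Int) (new_t_list : List Int) (something : List Int) : Decidable (Pre_make_new_list old_t_list new_t_list something) := by unfold Pre_make_new_list; infer_instance

def pvWitness_make_new_list : List Int × List Int × List Int := ([0, 5], [0, 3], [10, 20])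

def Spec_make_new_list (old_t_list : List Int) (new_t_list : List Int) (something : List Int) (out : List Int) : Prop := out = make_new_list_alt old_t_list new_t_list something
instance (old_t_list : List Int) (new_t_list : List Int) (something : List Int) (out : List Int) : Decidable (Spec_make_new_list old_t_list new_t_list something out) := by unfold Spec_make_new_list; infer_instance

-- ===== CLAIM (what is proved, stated in full; the proofs are below) =====
def Claim_equal_make_new_list : Prop := ∀ (old_t_list : List Int) (new_t_list : List Int) (something : List Int), Dom_make_new_list old_t_list new_t_list something → Pre_make_new_list old_t_list new_t_list something → Spec_make_new_list old_t_list new_t_list something (make_new_list old_t_list new_t_list something)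


-- ===== LEMMAS AND PROOFS =====

-- A's loop appends exactly the next (countP p old) elements of something, starting at index
lemma makeNewLoopA_eq (s e : Int) (something : List Int) :
    ∀ (old : List Int) (index : Nat) (acc : List Int),
      index + old.countP (fun t => decide (s ≤ t) && decide (t ≤ e)) ≤ something.length →
      makeNewLoopA old s e something index acc =
        acc ++ (something.drop index).take
          (old.countP (fun t => decide (s ≤ t) && decide (t ≤ e))) := by
  intro old
  induction old with
  | nil => intro index acc _; simp [makeNewLoopA]
  | cons t ts ih =>
    intro index acc h
    by_cases hp : s ≤ t ∧ t ≤ e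
    · have hc : (t :: ts).countP (fun t => decide (s ≤ t) && decide (t ≤ e)) =
          ts.countP (fun t => decide (s ≤ t) && decide (t ≤ e)) + 1 := by
        simp [hp.1, hp.2]
      rw [hc] at h
      have hidx : index < something.length := by omega
      have hget : PySem.List.pyGet? something (index : Int) = some something[index] := by
        simp [PySem.List.pyGet?_natCast, List.getElem?_eq_getElem hidx]
      rw [makeNewLoopA, if_pos hp, hget]
      rw [ih (index + 1) _ (by omega)]
      rw [hc, List.drop_eq_getElem_cons hidx, List.take_succ_cons]
      simp
    · have hc : (t :: ts).countP (fun t => decide (s ≤ t) && decide (t ≤ e)) =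
          ts.countP (fun t => decide (s ≤ t) && decide (t ≤ e)) := by
        have hdec : (decide (s ≤ t) && decide (t ≤ e)) = false := by
          by_cases h1 : s ≤ t
          · by_cases h2 : t ≤ e
            · exact absurd ⟨h1, h2⟩ hp
            · simp [h2]
          · simp [h1]
        simp [hdec]
      rw [makeNewLoopA, if_neg hp, ih index acc (by rw [← hc]; exact h), hc]

lemma pyGet?_head (xs : List Int) (h : xs ≠ []) :
    PySem.List.pyGet? xs 0 = some (xs.headD 0) := by
  cases xs with
  | nil => exact absurd rfl h
  | cons a l => simp

lemma pyGet?_last' (xs : List Int) (h : xs ≠ []) :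
    PySem.List.pyGet? xs ((xs.length : Int) - 1) = some (xs.getLastD 0) := by
  have hlen : 1 ≤ xs.length := List.length_pos_iff.mpr h
  have hcast : (xs.length : Int) - 1 = ((xs.length - 1 : Nat) : Int) := by omega
  rw [hcast, PySem.List.pyGet?_natCast, ← List.getLast?_eq_getElem?,
    List.getLastD_eq_getLast?]
  cases hx : xs.getLast? with
  | none => exact absurd (List.getLast?_eq_none_iff.mp hx) h
  | some y => rfl

lemma pyGet?_neg_one' (xs : List Int) (h : xs ≠ []) :
    PySem.List.pyGet? xs (-1) = some (xs.getLastD 0) := by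
  rw [PySem.List.pyGet?_neg_one, List.getLastD_eq_getLast?]
  cases hx : xs.getLast? with
  | none => exact absurd (List.getLast?_eq_none_iff.mp hx) h
  | some y => rfl

-- ===== VERDICT (by name: the statement is the Claim_ definition above) =====
theorem make_new_list_spec : Claim_equal_make_new_list := by
  intro old new something _ hpre
  obtain ⟨hne, hcnt⟩ := hpre
  unfold Spec_make_new_list make_new_list make_new_list_alt
  rw [pyGet?_head new hne, pyGet?_last' new hne, pyGet?_neg_one' new hne]
  dsimp only
  rw [makeNewLoopA_eq _ _ _ old 0 [] (by simpa using hcnt)]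
  simp
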